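-- pv_equiv track=rewrite | github.com/wang-jinghui/Neural-network | Pointwise/load_data.py | GetRankedLabels
-- ===== SOURCE A (Python) =====
-- def GetRankedLabels(Yrankscores, Y, QueryIds):
--     dict = {}
--     for i in range(len(QueryIds)):
--         if QueryIds[i] in dict:
--             dict[QueryIds[i]].append((Yrankscores[i], Y[i]))
--         else:
--             vec = []
--             vec.append((Yrankscores[i], Y[i]))
--             dict[QueryIds[i]] = vec
--
--     retdict = {}
--     for queryid in dict.keys():
--         retdict[queryid] = [tuple[1] for tuple in sorted(dict[queryid], reverse=True)]
--     return retdict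
-- ===== SOURCE B (Python) =====
-- def GetRankedLabels(Yrankscores, Y, QueryIds):
--     retdict = {q: [] for q in QueryIds}
--     for s, l, q in sorted(zip(Yrankscores, Y, QueryIds),
--                           key=lambda r: (r[0], r[1]), reverse=True):
--         retdict[q].append(l)
--     return retdict
-- ===== Notes on version B (the rewrite author's own statement) =====
-- stated objective: alternative
-- what changed: B replaces A's group-by-query-then-sort-each-group with one global stable sort of the zipped (score,label,query) records followed by a single grouping sweep into a dict pre-keyed in first-occurrence order.
import Mathlib
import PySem

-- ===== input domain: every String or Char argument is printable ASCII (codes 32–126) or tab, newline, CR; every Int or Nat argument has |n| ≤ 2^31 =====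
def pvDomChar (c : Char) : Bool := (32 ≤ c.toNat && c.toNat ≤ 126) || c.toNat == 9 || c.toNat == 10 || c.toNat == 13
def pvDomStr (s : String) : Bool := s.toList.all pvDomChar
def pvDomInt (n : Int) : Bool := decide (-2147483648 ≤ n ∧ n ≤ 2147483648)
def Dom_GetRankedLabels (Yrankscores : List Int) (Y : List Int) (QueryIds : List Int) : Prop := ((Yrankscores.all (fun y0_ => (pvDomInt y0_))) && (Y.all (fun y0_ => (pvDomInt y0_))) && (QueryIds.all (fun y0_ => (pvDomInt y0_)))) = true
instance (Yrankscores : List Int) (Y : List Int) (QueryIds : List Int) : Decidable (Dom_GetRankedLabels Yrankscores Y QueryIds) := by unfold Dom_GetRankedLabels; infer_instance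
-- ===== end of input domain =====

-- B replaces A's group-then-sort-each-group by one global stable sort of the zipped
-- records followed by a single grouping sweep; equivalence of the RETURN value is proved
-- under Pre_ (A raises IndexError when QueryIds is longer than Yrankscores or Y).

-- ===== PORT A =====
-- Indexing YrankScores[i]/Y[i]/QueryIds[i] is ported with pyGetD (default 0): exact for
-- every index the loop reaches under Pre_ (all in range); where Python raises IndexError
-- the input is outside Pre_.
def GetRankedLabels (Yrankscores : List Int) (Y : List Int) (QueryIds : List Int) : List (Int × List Int) :=
  let dict := (PySem.List.pyRange 0 (QueryIds.length : Int)).foldl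
    (fun d i =>
      let q := PySem.List.pyGetD QueryIds i 0
      let p := (PySem.List.pyGetD Yrankscores i 0, PySem.List.pyGetD Y i 0)
      if d.contains q then d.insert q (d.getD q [] ++ [p])
      else d.insert q [p]) PySem.Dict.empty
  let retdict := dict.keys.foldl
    (fun r q => r.insert q ((PySem.List.sorted2 (dict.getD q ([] : List (Int × Int))) (fun t => t.1) (fun t => t.2) true).map (fun t => t.2)))
    PySem.Dict.empty
  retdict.items

-- ===== PORT B =====
-- retdict[q].append(l) is ported as modify with default []: exact because every q that
-- the sweep meets was inserted by the comprehension pass (zip truncates to QueryIds or shorter).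
def GetRankedLabels_alt (Yrankscores : List Int) (Y : List Int) (QueryIds : List Int) : List (Int × List Int) :=
  let retdict := QueryIds.foldl (fun d q => d.insert q ([] : List Int)) PySem.Dict.empty
  let final := (PySem.List.sorted2 ((Yrankscores.zip Y).zip QueryIds)
      (fun r => r.1.1) (fun r => r.1.2) true).foldl
    (fun d r => d.modify r.2 [] (fun v => v ++ [r.1.2])) retdict
  final.items

-- ===== PRECONDITION & SPEC =====
-- Pre_ excludes exactly the inputs where A raises IndexError: QueryIds longer than
-- Yrankscores or Y.
def Pre_GetRankedLabels (Yrankscores : List Int) (Y : List Int) (QueryIds : List Int) : Prop :=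
  QueryIds.length ≤ Yrankscores.length ∧ QueryIds.length ≤ Y.length
instance (Yrankscores : List Int) (Y : List Int) (QueryIds : List Int) : Decidable (Pre_GetRankedLabels Yrankscores Y QueryIds) := by unfold Pre_GetRankedLabels; infer_instance
def pvWitness_GetRankedLabels : List Int × List Int × List Int := ([3, 1, 2, 1], [0, 1, 0, 1], [7, 8, 7, 8])

def Spec_GetRankedLabels (Yrankscores : List Int) (Y : List Int) (QueryIds : List Int) (out : List (Int × List Int)) : Prop := out = GetRankedLabels_alt Yrankscores Y QueryIds
instance (Yrankscores : List Int) (Y : List Int) (QueryIds : List Int) (out : List (Int × List Int)) : Decidable (Spec_GetRankedLabels Yrankscores Y QueryIds out) := by unfold Spec_GetRankedLabels; infer_instance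

-- ===== CLAIM (what is proved, stated in full; the proofs are below) =====
def Claim_equal_GetRankedLabels : Prop := ∀ (Yrankscores : List Int) (Y : List Int) (QueryIds : List Int), Dom_GetRankedLabels Yrankscores Y QueryIds → Pre_GetRankedLabels Yrankscores Y QueryIds → Spec_GetRankedLabels Yrankscores Y QueryIds (GetRankedLabels Yrankscores Y QueryIds)
-- ===== LEMMAS AND PROOFS =====

-- abstract before-relation lemmas about insertion sort
theorem pvInsertBy_map {α β : Type} (f : α → β) (bef : α → α → Bool) (bef' : β → β → Bool)
    (h : ∀ a b, bef a b = bef' (f a) (f b)) (x : α) :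
    ∀ ys : List α, (PySem.List.insertBy bef x ys).map f
      = PySem.List.insertBy bef' (f x) (ys.map f)
  | [] => by simp [PySem.List.insertBy]
  | y :: ys => by
      simp only [PySem.List.insertBy, List.map_cons]
      rw [h]
      by_cases hb : bef' (f x) (f y)
      · simp [hb]
      · simp [hb, pvInsertBy_map f bef bef' h x ys]

theorem pvSortFold_map {α β : Type} (f : α → β) (bef : α → α → Bool) (bef' : β → β → Bool)
    (h : ∀ a b, bef a b = bef' (f a) (f b)) :
    ∀ (xs acc : List α),
      (xs.foldl (fun acc x => PySem.List.insertBy bef x acc) acc).map f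
        = (xs.map f).foldl (fun acc y => PySem.List.insertBy bef' y acc) (acc.map f)
  | [], acc => rfl
  | x :: xs, acc => by
      simp only [List.foldl_cons, List.map_cons]
      rw [pvSortFold_map f bef bef' h xs, pvInsertBy_map f bef bef' h]

theorem pvFilter_insertBy_neg {α : Type} (bef : α → α → Bool) (p : α → Bool) (x : α)
    (hx : p x = false) :
    ∀ ys : List α, (PySem.List.insertBy bef x ys).filter p = ys.filter p
  | [] => by simp [PySem.List.insertBy, hx]
  | y :: ys => by
      simp only [PySem.List.insertBy]
      by_cases hb : bef x y
      · simp [hb, hx]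
      · simp only [hb]
        by_cases hy : p y <;>
          simp [hy, pvFilter_insertBy_neg bef p x hx ys]

theorem pvFilter_insertBy_pos {α : Type} (bef : α → α → Bool) (p : α → Bool)
    (Hasym : ∀ a b, bef a b = true → bef b a = false)
    (Htr : ∀ a b c, bef a b = true → bef c b = false → bef a c = true)
    (x : α) (hx : p x = true) :
    ∀ ys : List α, ys.Pairwise (fun a b => bef b a = false) →
      (PySem.List.insertBy bef x ys).filter p = PySem.List.insertBy bef x (ys.filter p)
  | [], _ => by simp [PySem.List.insertBy, hx]
  | y :: ys, hp => by
      obtain ⟨hy, htl⟩ := List.pairwise_cons.mp hp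
      simp only [PySem.List.insertBy]
      by_cases hb : bef x y
      · -- x goes right before y
        by_cases hpy : p y
        · simp [hb, hx, hpy, PySem.List.insertBy]
        · simp only [if_pos hb, List.filter_cons, hx, hpy, if_true, if_false,
            Bool.false_eq_true]
          cases hfe : ys.filter p with
          | nil => simp [PySem.List.insertBy]
          | cons z zs =>
            have hz : z ∈ ys := List.mem_of_mem_filter (by rw [hfe]; exact List.mem_cons_self)
            have : bef x z = true := Htr x y z hb (hy z hz)
            simp [PySem.List.insertBy, this]
      · rw [if_neg hb]
        by_cases hpy : p y
        · simp only [List.filter_cons, hpy, if_true]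
          rw [pvFilter_insertBy_pos bef p Hasym Htr x hx ys htl]
          simp [PySem.List.insertBy, hb]
        · simp only [List.filter_cons, hpy, Bool.false_eq_true, if_false]
          exact pvFilter_insertBy_pos bef p Hasym Htr x hx ys htl

theorem pvInsertBy_pairwise {α : Type} (bef : α → α → Bool)
    (Hasym : ∀ a b, bef a b = true → bef b a = false)
    (Htr : ∀ a b c, bef a b = true → bef c b = false → bef a c = true) (x : α) :
    ∀ ys : List α, ys.Pairwise (fun a b => bef b a = false) →
      (PySem.List.insertBy bef x ys).Pairwise (fun a b => bef b a = false)
  | [], _ => by simp [PySem.List.insertBy]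
  | y :: ys, hp => by
      obtain ⟨hy, htl⟩ := List.pairwise_cons.mp hp
      simp only [PySem.List.insertBy]
      by_cases hb : bef x y
      · simp only [if_pos hb]
        refine List.pairwise_cons.mpr ⟨?_, hp⟩
        intro z hz
        rcases List.mem_cons.mp hz with rfl | hz'
        · exact Hasym x z hb
        · by_contra hzx
          have hzx' : bef z x = true := by simpa using hzx
          have : bef z y = true := Htr z x y hzx' (Hasym x y hb)
          simp [hy z hz'] at this
      · rw [if_neg hb]
        refine List.pairwise_cons.mpr ⟨?_, pvInsertBy_pairwise bef Hasym Htr x ys htl⟩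
        intro z hz
        rcases (PySem.List.insertBy_mem_iff bef x z ys).mp hz with rfl | hz'
        · simpa using hb
        · exact hy z hz'

theorem pvSortFold_filter {α : Type} (bef : α → α → Bool) (p : α → Bool)
    (Hasym : ∀ a b, bef a b = true → bef b a = false)
    (Htr : ∀ a b c, bef a b = true → bef c b = false → bef a c = true) :
    ∀ (xs acc : List α), acc.Pairwise (fun a b => bef b a = false) →
      (xs.foldl (fun acc x => PySem.List.insertBy bef x acc) acc).filter p
        = (xs.filter p).foldl (fun acc x => PySem.List.insertBy bef x acc) (acc.filter p)
  | [], acc, _ => rfl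
  | x :: xs, acc, hp => by
      simp only [List.foldl_cons, List.filter_cons]
      by_cases hx : p x
      · simp only [hx, if_true, List.foldl_cons]
        rw [pvSortFold_filter bef p Hasym Htr xs _ (pvInsertBy_pairwise bef Hasym Htr x acc hp),
          pvFilter_insertBy_pos bef p Hasym Htr x hx acc hp]
      · simp only [hx, Bool.false_eq_true, if_false]
        rw [pvSortFold_filter bef p Hasym Htr xs _ (pvInsertBy_pairwise bef Hasym Htr x acc hp),
          pvFilter_insertBy_neg bef p x (by simpa using hx) acc]

-- the concrete "before" relation of a reverse sort on the key (r.1.1, r.1.2)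
def pvBef (a b : (Int × Int) × Int) : Bool :=
  decide (b.1.1 < a.1.1) || (!decide (a.1.1 < b.1.1) && decide (b.1.2 < a.1.2))

def pvBef' (a b : Int × Int) : Bool :=
  decide (b.1 < a.1) || (!decide (a.1 < b.1) && decide (b.2 < a.2))

theorem pvSorted2_eq (xs : List ((Int × Int) × Int)) :
    PySem.List.sorted2 xs (fun r => r.1.1) (fun r => r.1.2) true
      = xs.foldl (fun acc x => PySem.List.insertBy pvBef x acc) [] := rfl

theorem pvSorted2_eq' (xs : List (Int × Int)) :
    PySem.List.sorted2 xs (fun t => t.1) (fun t => t.2) true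
      = xs.foldl (fun acc x => PySem.List.insertBy pvBef' x acc) [] := rfl

theorem pvBef_asym : ∀ a b, pvBef a b = true → pvBef b a = false := by
  intro a b h
  simp only [pvBef] at *
  simp at h ⊢
  omega

theorem pvBef_tr : ∀ a b c, pvBef a b = true → pvBef c b = false → pvBef a c = true := by
  intro a b c h1 h2
  simp only [pvBef] at *
  simp at h1 h2 ⊢
  omega

-- A's index loop over range(len(QueryIds)) is the fold over the zipped records
theorem pvFoldRangeNat {σ : Type} (g : σ → Int → Int → Int → σ) :
    ∀ (C A B : List Int) (s : σ), C.length ≤ A.length → C.length ≤ B.length →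
      (List.range C.length).foldl (fun s i => g s (A.getD i 0) (B.getD i 0) (C.getD i 0)) s
      = ((A.zip B).zip C).foldl (fun s r => g s r.1.1 r.1.2 r.2) s
  | [], _, _, s, _, _ => by simp
  | c :: C, A, B, s, hA, hB => by
      match A, B with
      | a :: A, b :: B =>
        simp only [List.length_cons, List.range_succ_eq_map, List.foldl_cons, List.foldl_map,
          List.getD_cons_zero, Nat.succ_eq_add_one, List.getD_cons_succ, List.zip_cons_cons]
        exact pvFoldRangeNat g C A B _ (by simpa using hA) (by simpa using hB)

theorem pvFoldRange {σ : Type} (g : σ → Int → Int → Int → σ)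
    (C A B : List Int) (s : σ) (hA : C.length ≤ A.length) (hB : C.length ≤ B.length) :
    (PySem.List.pyRange 0 (C.length : Int)).foldl
      (fun s i => g s (PySem.List.pyGetD A i 0) (PySem.List.pyGetD B i 0) (PySem.List.pyGetD C i 0)) s
    = ((A.zip B).zip C).foldl (fun s r => g s r.1.1 r.1.2 r.2) s := by
  rw [PySem.List.pyRange_zero_natCast, List.foldl_map]
  simp only [PySem.List.pyGetD_natCast]
  exact pvFoldRangeNat g C A B s hA hB

-- grouping folds, specialised to the two record shapes used by the ports
theorem pvGetD_fold_pair (l : List ((Int × Int) × Int)) (d : PySem.Dict Int (List (Int × Int))) (c : Int) :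
    (l.foldl (fun d r => d.modify r.2 [] (fun v => v ++ [r.1])) d).getD c []
      = d.getD c [] ++ (l.filter (fun r => r.2 == c)).map (fun r => r.1) := by
  rw [show (fun (d : PySem.Dict Int (List (Int × Int))) (r : (Int × Int) × Int) =>
        d.modify r.2 [] (fun v => v ++ [r.1]))
      = fun d r => (fun (d : PySem.Dict Int (List (Int × Int))) (p : Int × (Int × Int)) =>
          d.modify p.1 [] (fun v => v ++ [p.2])) d ((fun r => (r.2, r.1)) r) from rfl,
    ← List.foldl_map (f := fun (r : (Int × Int) × Int) => (r.2, r.1))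
      (g := fun (d : PySem.Dict Int (List (Int × Int))) (p : Int × (Int × Int)) =>
        d.modify p.1 [] (fun v => v ++ [p.2])),
    PySem.Dict.getD_foldl_modify_append]
  simp [List.filter_map, Function.comp_def]

theorem pvGetD_fold_lab (l : List ((Int × Int) × Int)) (d : PySem.Dict Int (List Int)) (c : Int) :
    (l.foldl (fun d r => d.modify r.2 [] (fun v => v ++ [r.1.2])) d).getD c []
      = d.getD c [] ++ (l.filter (fun r => r.2 == c)).map (fun r => r.1.2) := by
  rw [show (fun (d : PySem.Dict Int (List Int)) (r : (Int × Int) × Int) =>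
        d.modify r.2 [] (fun v => v ++ [r.1.2]))
      = fun d r => (fun (d : PySem.Dict Int (List Int)) (p : Int × Int) =>
          d.modify p.1 [] (fun v => v ++ [p.2])) d ((fun r => (r.2, r.1.2)) r) from rfl,
    ← List.foldl_map (f := fun (r : (Int × Int) × Int) => (r.2, r.1.2))
      (g := fun (d : PySem.Dict Int (List Int)) (p : Int × Int) =>
        d.modify p.1 [] (fun v => v ++ [p.2])),
    PySem.Dict.getD_foldl_modify_append]
  simp [List.filter_map, Function.comp_def]

theorem pvGetD_insert_nil (qs : List Int) :
    ∀ (d : PySem.Dict Int (List Int)), (∀ k, d.getD k [] = []) →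
      ∀ k, (qs.foldl (fun d q => d.insert q ([] : List Int)) d).getD k [] = [] := by
  induction qs with
  | nil => intro d hd k; simpa using hd k
  | cons q qs ih =>
      intro d hd k
      simp only [List.foldl_cons]
      exact ih _ (fun k' => by rw [PySem.Dict.getD_insert]; split <;> simp [hd]) k

theorem pvA_eq (Ys Y Q : List Int) (h1 : Q.length ≤ Ys.length) (h2 : Q.length ≤ Y.length) :
    GetRankedLabels Ys Y Q
      = (PySem.Set.ofList Q).map (fun q => (q,
          (PySem.List.sorted2 ((((Ys.zip Y).zip Q).filter (fun r => r.2 == q)).map (fun r => r.1))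
            (fun t => t.1) (fun t => t.2) true).map (fun t => t.2))) := by
  simp only [GetRankedLabels]
  have hbody : (fun (d : PySem.Dict Int (List (Int × Int))) (i : Int) =>
      if d.contains (PySem.List.pyGetD Q i 0) then
        d.insert (PySem.List.pyGetD Q i 0)
          (d.getD (PySem.List.pyGetD Q i 0) [] ++ [(PySem.List.pyGetD Ys i 0, PySem.List.pyGetD Y i 0)])
      else d.insert (PySem.List.pyGetD Q i 0) [(PySem.List.pyGetD Ys i 0, PySem.List.pyGetD Y i 0)])
      = fun (d : PySem.Dict Int (List (Int × Int))) (i : Int) => d.modify (PySem.List.pyGetD Q i 0) []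
          (fun v => v ++ [(PySem.List.pyGetD Ys i 0, PySem.List.pyGetD Y i 0)]) := by
    funext d i
    by_cases h : d.contains (PySem.List.pyGetD Q i 0)
    · simp [PySem.Dict.modify, h]
    · simp [PySem.Dict.modify, h, PySem.Dict.getD_of_not_contains _ _ (by simpa using h)]
  rw [hbody]
  have hfold : (PySem.List.pyRange 0 (Q.length : Int)).foldl
      (fun (d : PySem.Dict Int (List (Int × Int))) (i : Int) => d.modify (PySem.List.pyGetD Q i 0) []
        (fun v => v ++ [(PySem.List.pyGetD Ys i 0, PySem.List.pyGetD Y i 0)])) PySem.Dict.empty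
      = ((Ys.zip Y).zip Q).foldl
          (fun d r => d.modify r.2 [] (fun v => v ++ [r.1])) PySem.Dict.empty :=
    pvFoldRange (fun (d : PySem.Dict Int (List (Int × Int))) (a b c : Int) => d.modify c [] (fun v => v ++ [(a, b)])) Q Ys Y PySem.Dict.empty h1 h2
  rw [hfold]
  have hmapsnd : (((Ys.zip Y).zip Q).map (fun r => r.2)) = Q :=
    List.map_snd_zip (by simp; omega)
  have hkeys : (((Ys.zip Y).zip Q).foldl
      (fun d r => d.modify r.2 [] (fun v => v ++ [r.1])) PySem.Dict.empty).keys
      = PySem.Set.ofList Q := by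
    rw [PySem.Dict.keys_foldl_modify_key]
    simp [PySem.Set.update_nil_left, hmapsnd]
  have hnodup : (((Ys.zip Y).zip Q).foldl
      (fun d r => d.modify r.2 [] (fun v => v ++ [r.1])) PySem.Dict.empty).keys.Nodup := by
    rw [hkeys]; exact PySem.Set.nodup_ofList Q
  have hgetd : ∀ q : Int, (((Ys.zip Y).zip Q).foldl
      (fun d r => d.modify r.2 [] (fun v => v ++ [r.1])) PySem.Dict.empty).getD q []
      = (((Ys.zip Y).zip Q).filter (fun r => r.2 == q)).map (fun r => r.1) := by
    intro q; rw [pvGetD_fold_pair]; simp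
  rw [PySem.Dict.items_foldl_insert_fresh _ (fun q => q) _ _
    (fun a _ => by simp) (by simpa using hnodup)]
  simp only [hkeys]
  refine List.map_congr_left ?_
  intro q _
  rw [hgetd q]


theorem pvVal_eq (L : List ((Int × Int) × Int)) (q : Int) :
    ((PySem.List.sorted2 L (fun r => r.1.1) (fun r => r.1.2) true).filter
        (fun r => r.2 == q)).map (fun r => r.1.2)
    = (PySem.List.sorted2 ((L.filter (fun r => r.2 == q)).map (fun r => r.1))
        (fun t => t.1) (fun t => t.2) true).map (fun t => t.2) := by
  rw [pvSorted2_eq, pvSorted2_eq',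
    pvSortFold_filter pvBef _ pvBef_asym pvBef_tr L [] (List.Pairwise.nil),
    show (fun (r : (Int × Int) × Int) => r.1.2)
      = (fun (t : Int × Int) => t.2) ∘ (fun (r : (Int × Int) × Int) => r.1) from rfl,
    ← List.map_map,
    pvSortFold_map (fun (r : (Int × Int) × Int) => r.1) pvBef pvBef' (fun a b => rfl)]
  simp

theorem pvB_eq (Ys Y Q : List Int) :
    GetRankedLabels_alt Ys Y Q
      = (PySem.Set.ofList Q).map (fun q => (q,
          ((PySem.List.sorted2 ((Ys.zip Y).zip Q) (fun r => r.1.1) (fun r => r.1.2) true).filter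
            (fun r => r.2 == q)).map (fun r => r.1.2))) := by
  simp only [GetRankedLabels_alt]
  have hd0keys : (Q.foldl (fun d q => d.insert q ([] : List Int)) PySem.Dict.empty).keys
      = PySem.Set.ofList Q := by
    rw [PySem.Dict.keys_foldl_insert_key Q (fun q => q) (fun _ _ => ([] : List Int))]
    simp [PySem.Set.update_nil_left]
  have hd0getd : ∀ k : Int,
      (Q.foldl (fun d q => d.insert q ([] : List Int)) PySem.Dict.empty).getD k [] = [] :=
    pvGetD_insert_nil Q PySem.Dict.empty (fun k => by simp)
  have hkeys : ((PySem.List.sorted2 ((Ys.zip Y).zip Q) (fun r => r.1.1) (fun r => r.1.2) true).foldl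
      (fun d r => d.modify r.2 [] (fun v => v ++ [r.1.2]))
      (Q.foldl (fun d q => d.insert q ([] : List Int)) PySem.Dict.empty)).keys
      = PySem.Set.ofList Q := by
    rw [PySem.Dict.keys_foldl_modify_key, hd0keys, PySem.Set.update_eq_append_filter]
    have : (PySem.Set.ofList ((PySem.List.sorted2 ((Ys.zip Y).zip Q)
        (fun r => r.1.1) (fun r => r.1.2) true).map (fun r => r.2))).filter
        (fun y => !(PySem.Set.ofList Q).contains y) = [] := by
      rw [List.filter_eq_nil_iff]
      intro y hy
      have hy' : y ∈ (PySem.List.sorted2 ((Ys.zip Y).zip Q)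
          (fun r => r.1.1) (fun r => r.1.2) true).map (fun r => r.2) :=
        (PySem.Set.mem_ofList _ _).mp hy
      obtain ⟨r, hr, rfl⟩ := List.mem_map.mp hy'
      have hrL : r ∈ (Ys.zip Y).zip Q :=
        (PySem.List.sorted2_perm ((Ys.zip Y).zip Q) _ _ true).mem_iff.mp hr
      have hq : r.2 ∈ Q := by
        obtain ⟨r1, r2⟩ := r
        exact (List.of_mem_zip hrL).2
      simp [PySem.Set.contains, (PySem.Set.mem_ofList Q r.2).mpr hq]
    rw [this, List.append_nil]
  have hnodup : ((PySem.List.sorted2 ((Ys.zip Y).zip Q) (fun r => r.1.1) (fun r => r.1.2) true).foldl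
      (fun d r => d.modify r.2 [] (fun v => v ++ [r.1.2]))
      (Q.foldl (fun d q => d.insert q ([] : List Int)) PySem.Dict.empty)).keys.Nodup := by
    rw [hkeys]; exact PySem.Set.nodup_ofList Q
  rw [PySem.Dict.items_eq_map_keys _ hnodup [], hkeys]
  refine List.map_congr_left ?_
  intro q _
  rw [pvGetD_fold_lab, hd0getd q, List.nil_append]

theorem pvMain (Ys Y Q : List Int) (h1 : Q.length ≤ Ys.length) (h2 : Q.length ≤ Y.length) :
    GetRankedLabels Ys Y Q = GetRankedLabels_alt Ys Y Q := by
  rw [pvA_eq Ys Y Q h1 h2, pvB_eq Ys Y Q]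
  refine List.map_congr_left ?_
  intro q _
  rw [pvVal_eq]

-- ===== VERDICT (by name: the statement is the Claim_ definition above) =====
theorem GetRankedLabels_spec : Claim_equal_GetRankedLabels := by
  intro Ys Y Q _ hpre
  unfold Spec_GetRankedLabels
  exact pvMain Ys Y Q hpre.1 hpre.2
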